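-- pv_equiv track=rewrite | github.com/smoltuna/Flora-assets-pipeline | backend/routers/export.py | _match_care_value
-- ===== SOURCE A (Python) =====
-- _CARE_LABEL_MAP: dict[str, dict] = {
--     # ── Sun / shade ──────────────────────────────────────────────────────────
--     "full sun": {"icon": "sun.max.fill", "label": "Full Sun"},
--     "sun": {"icon": "sun.max.fill", "label": "Full Sun"},
--     "no shade": {"icon": "sun.max.fill", "label": "Full Sun"},
--     "full shade": {"icon": "moon.fill", "label": "Full Shade"},
--     "deep shade": {"icon": "moon.fill", "label": "Full Shade"},
--     "dense shade": {"icon": "moon.fill", "label": "Full Shade"},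
--     "part shade": {"icon": "cloud.sun.fill", "label": "Part Shade"},
--     "partial shade": {"icon": "cloud.sun.fill", "label": "Part Shade"},
--     "semi-shade": {"icon": "cloud.sun.fill", "label": "Part Shade"},
--     "semi shade": {"icon": "cloud.sun.fill", "label": "Part Shade"},
--     "dappled shade": {"icon": "cloud.sun.fill", "label": "Part Shade"},
--     "light shade": {"icon": "cloud.sun.fill", "label": "Part Shade"},
--     # ── Soil / moisture ──────────────────────────────────────────────────────
--     "well drained": {"icon": "drop", "label": "Well Drained"},
--     "well-drained": {"icon": "drop", "label": "Well Drained"},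
--     "well drained soil": {"icon": "drop", "label": "Well Drained Soil"},
--     "well-drained soil": {"icon": "drop", "label": "Well Drained Soil"},
--     "moist": {"icon": "drop.fill", "label": "Moist Soil"},
--     "moist soil": {"icon": "drop.fill", "label": "Moist Soil"},
--     "moisture retentive": {"icon": "drop.fill", "label": "Moist Soil"},
--     "wet": {"icon": "drop.fill", "label": "Wet Soil"},
--     "wet soil": {"icon": "drop.fill", "label": "Wet Soil"},
--     "boggy": {"icon": "drop.fill", "label": "Wet Soil"},
--     "waterlogged": {"icon": "drop.fill", "label": "Wet Soil"},
--     "water plants": {"icon": "drop.fill", "label": "Water Plants"},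
--     "aquatic": {"icon": "drop.fill", "label": "Water Plants"},
--     "pond": {"icon": "drop.fill", "label": "Water Plants"},
--     # ── Hardiness ────────────────────────────────────────────────────────────
--     "fully hardy": {"icon": "snowflake", "label": "Fully Hardy"},
--     "frost hardy": {"icon": "snowflake", "label": "Frost Hardy"},
--     "frost resistant": {"icon": "snowflake", "label": "Frost Hardy"},
--     "half hardy": {"icon": "snowflake", "label": "Half Hardy"},
--     "tender": {"icon": "snowflake", "label": "Tender"},
--     "not hardy": {"icon": "snowflake", "label": "Tender"},
--     "tropical": {"icon": "snowflake", "label": "Tender"},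
--     "subtropical": {"icon": "snowflake", "label": "Tender"},
-- }
--
-- _SKIP_VALUES = frozenset([
--     "not specified", "n/a", "unknown", "information not available",
--     "usda", "none", "no information",
-- ])
--
-- def _match_care_value(text: str) -> dict | None:
--     """Match a single text string to a canonical {icon, label}, or None."""
--     v = text.strip().lower()
--     if not v or v in _SKIP_VALUES:
--         return None
--     # Exact match first
--     if v in _CARE_LABEL_MAP:
--         return _CARE_LABEL_MAP[v]
--     # Longest-prefix substring match
--     best: tuple[int, dict] | None = None
--     for key, entry in _CARE_LABEL_MAP.items():
--         if key in v or v in key: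
--             if best is None or len(key) > best[0]:
--                 best = (len(key), entry)
--     return best[1] if best else None
-- ===== SOURCE B (Python) =====
-- # B: the care table kept as groups (icon, label, keys) instead of a flat dict;
-- # one pass over the groups for an exact key, then a first-match pass over the
-- # keys presorted once by descending length (stable, so insertion order breaks
-- # ties exactly as A's strict-max scan does).
-- _CARE_GROUPS = [
--     ("sun.max.fill", "Full Sun", ("full sun", "sun", "no shade")),
--     ("moon.fill", "Full Shade", ("full shade", "deep shade", "dense shade")),
--     ("cloud.sun.fill", "Part Shade",
--      ("part shade", "partial shade", "semi-shade", "semi shade",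
--       "dappled shade", "light shade")),
--     ("drop", "Well Drained", ("well drained", "well-drained")),
--     ("drop", "Well Drained Soil", ("well drained soil", "well-drained soil")),
--     ("drop.fill", "Moist Soil", ("moist", "moist soil", "moisture retentive")),
--     ("drop.fill", "Wet Soil", ("wet", "wet soil", "boggy", "waterlogged")),
--     ("drop.fill", "Water Plants", ("water plants", "aquatic", "pond")),
--     ("snowflake", "Fully Hardy", ("fully hardy",)),
--     ("snowflake", "Frost Hardy", ("frost hardy", "frost resistant")),
--     ("snowflake", "Half Hardy", ("half hardy",)),
--     ("snowflake", "Tender", ("tender", "not hardy", "tropical", "subtropical")),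
-- ]
--
-- _SKIP_VALUES = frozenset([
--     "not specified", "n/a", "unknown", "information not available",
--     "usda", "none", "no information",
-- ])
--
-- _BY_LEN = sorted(
--     ((k, {"icon": icon, "label": label})
--      for icon, label, keys in _CARE_GROUPS for k in keys),
--     key=lambda ke: len(ke[0]), reverse=True)
--
-- def _match_care_value(text: str) -> dict | None:
--     """Match a single text string to a canonical {icon, label}, or None."""
--     v = text.strip().lower()
--     if not v or v in _SKIP_VALUES:
--         return None
--     for icon, label, keys in _CARE_GROUPS:
--         if v in keys:
--             return {"icon": icon, "label": label}
--     for k, entry in _BY_LEN: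
--         if k in v or v in k:
--             return entry
--     return None
-- ===== Notes on version B (the rewrite author's own statement) =====
-- stated objective: alternative
-- what changed: B replaces the flat dict plus scan-keeping-a-running-maximum by a grouped table (icon, label, key-tuple): one pass over the groups for an exact key, then a first-match pass over the keys presorted once by descending length (stable sort, so insertion order breaks length ties exactly as A's strict-max scan does).
import Mathlib
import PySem

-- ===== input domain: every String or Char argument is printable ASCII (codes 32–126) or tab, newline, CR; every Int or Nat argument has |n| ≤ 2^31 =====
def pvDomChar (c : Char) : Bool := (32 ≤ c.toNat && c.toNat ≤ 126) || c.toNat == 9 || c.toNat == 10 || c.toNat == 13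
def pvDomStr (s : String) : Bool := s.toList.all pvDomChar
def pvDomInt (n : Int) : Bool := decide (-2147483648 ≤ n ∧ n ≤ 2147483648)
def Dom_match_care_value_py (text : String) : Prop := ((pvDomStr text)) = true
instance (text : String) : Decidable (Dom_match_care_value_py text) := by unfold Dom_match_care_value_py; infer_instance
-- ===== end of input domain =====

-- B keeps the care table as groups (icon, label, keys): one pass over the groups for
-- an exact key, then a first-match pass over the keys presorted once by descending
-- length (stable, so insertion order breaks ties as A's strict-max scan does);
-- objective: alternative.

-- A-side skip set (B's Python shares this frozenset literal)
def skipValues : List String :=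
  ["not specified", "n/a", "unknown", "information not available", "usda", "none", "no information"]

-- ===== PORT A =====
-- A's module dict literal
def careItems : List (String × List (String × String)) :=
  [ ("full sun", [("icon", "sun.max.fill"), ("label", "Full Sun")]),
    ("sun", [("icon", "sun.max.fill"), ("label", "Full Sun")]),
    ("no shade", [("icon", "sun.max.fill"), ("label", "Full Sun")]),
    ("full shade", [("icon", "moon.fill"), ("label", "Full Shade")]),
    ("deep shade", [("icon", "moon.fill"), ("label", "Full Shade")]),
    ("dense shade", [("icon", "moon.fill"), ("label", "Full Shade")]),
    ("part shade", [("icon", "cloud.sun.fill"), ("label", "Part Shade")]),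
    ("partial shade", [("icon", "cloud.sun.fill"), ("label", "Part Shade")]),
    ("semi-shade", [("icon", "cloud.sun.fill"), ("label", "Part Shade")]),
    ("semi shade", [("icon", "cloud.sun.fill"), ("label", "Part Shade")]),
    ("dappled shade", [("icon", "cloud.sun.fill"), ("label", "Part Shade")]),
    ("light shade", [("icon", "cloud.sun.fill"), ("label", "Part Shade")]),
    ("well drained", [("icon", "drop"), ("label", "Well Drained")]),
    ("well-drained", [("icon", "drop"), ("label", "Well Drained")]),
    ("well drained soil", [("icon", "drop"), ("label", "Well Drained Soil")]),
    ("well-drained soil", [("icon", "drop"), ("label", "Well Drained Soil")]),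
    ("moist", [("icon", "drop.fill"), ("label", "Moist Soil")]),
    ("moist soil", [("icon", "drop.fill"), ("label", "Moist Soil")]),
    ("moisture retentive", [("icon", "drop.fill"), ("label", "Moist Soil")]),
    ("wet", [("icon", "drop.fill"), ("label", "Wet Soil")]),
    ("wet soil", [("icon", "drop.fill"), ("label", "Wet Soil")]),
    ("boggy", [("icon", "drop.fill"), ("label", "Wet Soil")]),
    ("waterlogged", [("icon", "drop.fill"), ("label", "Wet Soil")]),
    ("water plants", [("icon", "drop.fill"), ("label", "Water Plants")]),
    ("aquatic", [("icon", "drop.fill"), ("label", "Water Plants")]),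
    ("pond", [("icon", "drop.fill"), ("label", "Water Plants")]),
    ("fully hardy", [("icon", "snowflake"), ("label", "Fully Hardy")]),
    ("frost hardy", [("icon", "snowflake"), ("label", "Frost Hardy")]),
    ("frost resistant", [("icon", "snowflake"), ("label", "Frost Hardy")]),
    ("half hardy", [("icon", "snowflake"), ("label", "Half Hardy")]),
    ("tender", [("icon", "snowflake"), ("label", "Tender")]),
    ("not hardy", [("icon", "snowflake"), ("label", "Tender")]),
    ("tropical", [("icon", "snowflake"), ("label", "Tender")]),
    ("subtropical", [("icon", "snowflake"), ("label", "Tender")]) ]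

def careLabelMap : PySem.Dict String (List (String × String)) := PySem.Dict.mk careItems

-- the for-loop of A: running best as Optional (len key, entry), replaced only on strictly greater length
def scanBest (v : String) :
    List (String × List (String × String)) → Option (Int × List (String × String)) →
    Option (Int × List (String × String))
  | [], best => best
  | (key, entry) :: rest, best =>
    scanBest v rest
      (if PySem.Str.isIn key v || PySem.Str.isIn v key then
        match best with
        | none => some (PySem.Str.len key, entry)
        | some (m, e) => if PySem.Str.len key > m then some (PySem.Str.len key, entry) else some (m, e)
      else best)

def match_care_value_py (text : String) : Option (List (String × String)) :=
  let v := PySem.Str.lower (PySem.Str.strip text)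
  if v = "" || decide (v ∈ skipValues) then none
  else
    match PySem.Dict.get? careLabelMap v with
    | some e => some e
    | none => (scanBest v careLabelMap.items none).map (·.2)

-- ===== PORT B =====
-- B's module table: groups (icon, label, keys)
def careGroups : List (String × String × List String) :=
  [ ("sun.max.fill", "Full Sun", ["full sun", "sun", "no shade"]),
    ("moon.fill", "Full Shade", ["full shade", "deep shade", "dense shade"]),
    ("cloud.sun.fill", "Part Shade",
      ["part shade", "partial shade", "semi-shade", "semi shade", "dappled shade", "light shade"]),
    ("drop", "Well Drained", ["well drained", "well-drained"]),
    ("drop", "Well Drained Soil", ["well drained soil", "well-drained soil"]),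
    ("drop.fill", "Moist Soil", ["moist", "moist soil", "moisture retentive"]),
    ("drop.fill", "Wet Soil", ["wet", "wet soil", "boggy", "waterlogged"]),
    ("drop.fill", "Water Plants", ["water plants", "aquatic", "pond"]),
    ("snowflake", "Fully Hardy", ["fully hardy"]),
    ("snowflake", "Frost Hardy", ["frost hardy", "frost resistant"]),
    ("snowflake", "Half Hardy", ["half hardy"]),
    ("snowflake", "Tender", ["tender", "not hardy", "tropical", "subtropical"]) ]

-- {"icon": icon, "label": label}
def entryOf (icon label : String) : List (String × String) := [("icon", icon), ("label", label)]

-- _BY_LEN: all (key, entry) pairs, presorted once by descending key length (stable Python sort)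
def byLen : List (String × List (String × String)) :=
  PySem.List.sorted
    (careGroups.flatMap (fun g => g.2.2.map (fun k => (k, entryOf g.1 g.2.1))))
    (fun ke => PySem.Str.len ke.1) true

-- first for-loop of B: exact key among a group's key tuple
def findExact (v : String) : List (String × String × List String) → Option (List (String × String))
  | [] => none
  | (icon, label, keys) :: rest =>
    if decide (v ∈ keys) then some (entryOf icon label) else findExact v rest

-- second for-loop of B: entry of the first substring-matching key
def firstMatch (v : String) :
    List (String × List (String × String)) → Option (List (String × String))
  | [] => none
  | (key, entry) :: rest =>
    if PySem.Str.isIn key v || PySem.Str.isIn v key then some entry else firstMatch v rest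

def match_care_value_py_alt (text : String) : Option (List (String × String)) :=
  let v := PySem.Str.lower (PySem.Str.strip text)
  if v = "" || decide (v ∈ skipValues) then none
  else
    match findExact v careGroups with
    | some e => some e
    | none => firstMatch v byLen

-- ===== PRECONDITION & SPEC =====
def Spec_match_care_value_py (text : String) (out : Option (List (String × String))) : Prop := out = match_care_value_py_alt text
instance (text : String) (out : Option (List (String × String))) : Decidable (Spec_match_care_value_py text out) := by unfold Spec_match_care_value_py; infer_instance

-- ===== CLAIM (what is proved, stated in full; the proofs are below) =====
def Claim_equal_match_care_value_py : Prop := ∀ (text : String), Dom_match_care_value_py text → Spec_match_care_value_py text (match_care_value_py text)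

-- ===== LEMMAS AND PROOFS =====

-- proof-side abbreviations for the match predicate, the length measure and the stored pair
def pvQ (v : String) (kv : String × List (String × String)) : Bool :=
  PySem.Str.isIn kv.1 v || PySem.Str.isIn v kv.1
def pvF (kv : String × List (String × String)) : Int := PySem.Str.len kv.1
def pvG (kv : String × List (String × String)) : Int × List (String × String) := (pvF kv, kv.2)
def pvFlat (gs : List (String × String × List String)) : List (String × List (String × String)) :=
  gs.flatMap (fun g => g.2.2.map (fun k => (k, entryOf g.1 g.2.1)))

-- B's grouped table flattens to A's dict items in order
lemma pvFlat_eq : pvFlat careGroups = careItems := by decide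

-- first-match-in-a-group equals first-match dict lookup on the flattened pairs
lemma pvLookup_map_const (v : String) (e : List (String × String)) :
    ∀ (ks : List String) (rest : List (String × List (String × String))),
      (PySem.Dict.mk (ks.map (fun k => (k, e)) ++ rest)).get? v =
        if v ∈ ks then some e else (PySem.Dict.mk rest).get? v := by
  intro ks
  induction ks with
  | nil => intro rest; simp
  | cons k ks ih =>
    intro rest
    rw [List.map_cons, List.cons_append, PySem.Dict.get?_mk_cons]
    by_cases h : k = v
    · simp [h]
    · have : ¬ v = k := fun e => h e.symm
      simp [h, this, ih]

-- B's exact pass over the groups = A's dict lookup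
lemma pvExact_eq (v : String) :
    ∀ gs, findExact v gs = (PySem.Dict.mk (pvFlat gs)).get? v := by
  intro gs
  induction gs with
  | nil => rfl
  | cons g rest ih =>
    obtain ⟨icon, label, keys⟩ := g
    have hflat : pvFlat ((icon, label, keys) :: rest) =
        keys.map (fun k => (k, entryOf icon label)) ++ pvFlat rest := by
      simp [pvFlat]
    rw [hflat, pvLookup_map_const, findExact]
    by_cases h : v ∈ keys
    · simp [h]
    · simp [h, ih]

-- in a duplicate-free list, the pair-sublist order is the index order
lemma pvIdx_lt {α : Type} [DecidableEq α] :
    ∀ (ms : List α) (a b : α), ms.Nodup → List.Sublist [a, b] ms → ms.idxOf a < ms.idxOf b := by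
  intro ms
  induction ms with
  | nil => intro a b _ h; cases h
  | cons c rest ih =>
    intro a b hnd h
    have hc : c ∉ rest := (List.nodup_cons.mp hnd).1
    have hr : rest.Nodup := (List.nodup_cons.mp hnd).2
    cases h with
    | cons _ h' =>
      have ha : a ∈ rest := h'.subset (by simp)
      have hb : b ∈ rest := h'.subset (by simp)
      have hac : a ≠ c := fun e => hc (e ▸ ha)
      have hbc : b ≠ c := fun e => hc (e ▸ hb)
      simpa [List.idxOf_cons, hac.symm, hbc.symm, Nat.succ_lt_succ_iff]
        using ih a b hr h'
    | cons₂ _ h' =>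
      have hb : b ∈ rest := h'.subset (by simp)
      have hbc : b ≠ c := fun e => hc (e ▸ hb)
      simp [hbc.symm]

-- head of a stable descending rearrangement = first strict-maximum of the original
lemma pvHead_eq_argmax {α : Type} [DecidableEq α] (f : α → Int) (ms ms' : List α)
    (hperm : ms'.Perm ms)
    (hsort : ms'.Pairwise (fun a b => f b ≤ f a))
    (hstab : ms'.Pairwise (fun a b => f a = f b → List.Sublist [a, b] ms))
    (hnd : ms.Nodup) :
    ms'.head? = List.argmax f ms := by
  cases ms' with
  | nil =>
    have : ms = [] := hperm.symm.eq_nil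
    simp [this]
  | cons a t =>
    have hmem : ∀ x ∈ ms, x = a ∨ x ∈ t := by
      intro x hx
      have := hperm.mem_iff.mpr hx
      simpa using this
    have hsa := (List.pairwise_cons.mp hsort).1
    have hst := (List.pairwise_cons.mp hstab).1
    rw [List.head?_cons]
    symm
    rw [List.argmax_eq_some_iff]
    refine ⟨hperm.mem_iff.mp (by simp), ?_, ?_⟩
    · intro b hb
      rcases hmem b hb with rfl | hbt
      · exact le_refl _
      · exact hsa b hbt
    · intro b hb hab
      rcases hmem b hb with rfl | hbt
      · exact le_refl _
      · have : f a = f b := le_antisymm hab (hsa b hbt)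
        exact Nat.le_of_lt (pvIdx_lt ms a b hnd (hst b hbt this))

-- A's guarded fold over the items is the argmax fold over the matching items
lemma pvScan_eq (v : String) :
    ∀ (L : List (String × List (String × String))) (o : Option (String × List (String × String))),
      scanBest v L (o.map pvG) =
        (List.foldl (List.argAux fun b c => pvF c < pvF b) o (L.filter (pvQ v))).map pvG := by
  intro L
  induction L with
  | nil => intro o; rfl
  | cons kv rest ih =>
    intro o
    obtain ⟨key, entry⟩ := kv
    by_cases hq : pvQ v (key, entry)
    · cases o with
      | none =>
        have h1 : scanBest v ((key, entry) :: rest) ((none : Option (String × List (String × String))).map pvG)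
            = scanBest v rest ((some (key, entry)).map pvG) := by
          simp only [Option.map_none, Option.map_some, scanBest]
          rw [if_pos (by simpa [pvQ] using hq)]
          rfl
        rw [h1, ih]
        simp [hq, List.argAux]
      | some c =>
        obtain ⟨ck, ce⟩ := c
        have h1 : scanBest v ((key, entry) :: rest) ((some (ck, ce)).map pvG)
            = scanBest v rest ((List.argAux (fun b c => pvF c < pvF b) (some (ck, ce)) (key, entry)).map pvG) := by
          simp only [Option.map_some, scanBest, pvG, pvF]
          rw [if_pos (by simpa [pvQ] using hq)]
          simp only [List.argAux, gt_iff_lt, PySem.Str.len_eq]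
          split_ifs <;> simp [pvG, pvF]
        rw [h1, ih]
        simp [hq]
    · have h1 : scanBest v ((key, entry) :: rest) (o.map pvG) = scanBest v rest (o.map pvG) := by
        cases o <;>
          · simp only [Option.map_none, Option.map_some, scanBest]
            rw [if_neg (by simpa [pvQ] using hq)]
      rw [h1, ih]
      simp [hq]

-- B's second loop is head-of-filter
lemma pvFirst_eq (v : String) :
    ∀ (S : List (String × List (String × String))),
      firstMatch v S = ((S.filter (pvQ v)).head?).map (·.2) := by
  intro S
  induction S with
  | nil => rfl
  | cons kv rest ih =>
    obtain ⟨key, entry⟩ := kv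
    by_cases hq : pvQ v (key, entry)
    · simp only [firstMatch]
      rw [if_pos (by simpa [pvQ] using hq)]
      simp [hq]
    · simp only [firstMatch]
      rw [if_neg (by simpa [pvQ] using hq)]
      simp [hq, ih]

-- byLen stated over A's item list
lemma pvByLen_eq : byLen = PySem.List.sorted careItems (fun kv => PySem.Str.len kv.1) true := by
  unfold byLen
  rw [show careGroups.flatMap (fun g => g.2.2.map (fun k => (k, entryOf g.1 g.2.1))) = careItems
      from pvFlat_eq]

-- static facts
lemma pvStab : (PySem.List.sorted careItems (fun kv => PySem.Str.len kv.1) true).Pairwise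
    (fun a b => pvF a = pvF b → List.Sublist [a, b] careItems) := by decide

lemma pvNodup : careItems.Nodup := by decide

-- the two substring loops agree for every needle v
lemma pvLoops_eq (v : String) :
    (scanBest v careLabelMap.items none).map (·.2) = firstMatch v byLen := by
  rw [pvByLen_eq]
  have hperm : ((PySem.List.sorted careItems (fun kv => PySem.Str.len kv.1) true).filter (pvQ v)).Perm
      (careItems.filter (pvQ v)) :=
    (PySem.List.sorted_perm careItems (fun kv => PySem.Str.len kv.1) true).filter _
  have hsort : ((PySem.List.sorted careItems (fun kv => PySem.Str.len kv.1) true).filter (pvQ v)).Pairwise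
      (fun a b => pvF b ≤ pvF a) :=
    (PySem.List.sorted_pairwise_rev careItems (fun kv => PySem.Str.len kv.1)).sublist
      List.filter_sublist
  have hstab : ((PySem.List.sorted careItems (fun kv => PySem.Str.len kv.1) true).filter (pvQ v)).Pairwise
      (fun a b => pvF a = pvF b → List.Sublist [a, b] (careItems.filter (pvQ v))) := by
    have h0 := pvStab.sublist (List.filter_sublist
      (l := PySem.List.sorted careItems (fun kv => PySem.Str.len kv.1) true) (p := pvQ v))
    refine h0.imp_of_mem ?_
    intro a b ha hb hab heq
    have hqa : pvQ v a = true := (List.mem_filter.mp ha).2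
    have hqb : pvQ v b = true := (List.mem_filter.mp hb).2
    have := (hab heq).filter (pvQ v)
    simpa [hqa, hqb] using this
  have hhead := pvHead_eq_argmax pvF (careItems.filter (pvQ v))
    ((PySem.List.sorted careItems (fun kv => PySem.Str.len kv.1) true).filter (pvQ v))
    hperm hsort hstab (pvNodup.filter _)
  have hscan := pvScan_eq v careItems none
  simp only [Option.map_none] at hscan
  have hitems : careLabelMap.items = careItems := rfl
  have hargm : List.foldl (List.argAux fun b c => pvF c < pvF b) none (List.filter (pvQ v) careItems)
      = List.argmax pvF (careItems.filter (pvQ v)) := rfl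
  rw [hitems, hscan, hargm, ← hhead, pvFirst_eq v, Option.map_map]
  rfl

-- ===== VERDICT (by name: the statement is the Claim_ definition above) =====
theorem match_care_value_py_spec : Claim_equal_match_care_value_py := by
  intro text _
  show match_care_value_py text = match_care_value_py_alt text
  unfold match_care_value_py match_care_value_py_alt
  by_cases h : PySem.Str.lower (PySem.Str.strip text) = "" ∨
      PySem.Str.lower (PySem.Str.strip text) ∈ skipValues
  · simp only []
    rw [if_pos (by simpa using h), if_pos (by simpa using h)]
  · simp only []
    rw [if_neg (by simpa using h), if_neg (by simpa using h)]
    have hex : findExact (PySem.Str.lower (PySem.Str.strip text)) careGroups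
        = PySem.Dict.get? careLabelMap (PySem.Str.lower (PySem.Str.strip text)) := by
      rw [pvExact_eq]
      rw [show pvFlat careGroups = careItems from pvFlat_eq]
      rfl
    rw [hex]
    cases hg : PySem.Dict.get? careLabelMap (PySem.Str.lower (PySem.Str.strip text)) with
    | some e => rfl
    | none => exact pvLoops_eq _
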